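-- pv_equiv track=rewrite | github.com/valscope-sys/telegram-briefing-bot | telegram_bot/issue_bot/pipeline/linter.py | lint_summary
-- ===== SOURCE A (Python) =====
-- def lint_summary(violations: list) -> str:
--     """위반 결과를 사람이 읽기 좋은 요약으로"""
--     if not violations:
--         return "통과 (R1~R8 위반 없음)"
--     grouped = {}
--     for v in violations:
--         grouped.setdefault(v["rule"], []).append(v["detail"])
--     lines = []
--     for rule, details in sorted(grouped.items()):
--         lines.append(f"  {rule}: {', '.join(details[:2])}")
--         if len(details) > 2:
--             lines[-1] += f" (외 {len(details) - 2}건)"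
--     return "\n".join(lines)
-- ===== SOURCE B (Python) =====
-- def lint_summary(violations: list) -> str:
--     """위반 결과를 사람이 읽기 좋은 요약으로"""
--     if not violations:
--         return "통과 (R1~R8 위반 없음)"
--     out = ""
--     sep = ""
--     for rule in sorted({v["rule"] for v in violations}):
--         details = [v["detail"] for v in violations if v["rule"] == rule]
--         if len(details) == 1:
--             body = details[0]
--         elif len(details) == 2:
--             body = details[0] + ", " + details[1]
--         else:
--             body = details[0] + ", " + details[1] + " (외 " + str(len(details) - 2) + "건)"
--         out += sep + "  " + rule + ": " + body
--         sep = "\n"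
--     return out
-- ===== Notes on version B (the rewrite author's own statement) =====
-- stated objective: alternative
-- what changed: B drops A's dict-of-lists accumulation, the list of lines and str.join entirely: it sorts the distinct set of rules once, collects each rule's details by a per-rule filter pass, formats by explicit case analysis on the detail count instead of slicing, and concatenates the result into a single string accumulator with a separator variable.
import Mathlib
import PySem

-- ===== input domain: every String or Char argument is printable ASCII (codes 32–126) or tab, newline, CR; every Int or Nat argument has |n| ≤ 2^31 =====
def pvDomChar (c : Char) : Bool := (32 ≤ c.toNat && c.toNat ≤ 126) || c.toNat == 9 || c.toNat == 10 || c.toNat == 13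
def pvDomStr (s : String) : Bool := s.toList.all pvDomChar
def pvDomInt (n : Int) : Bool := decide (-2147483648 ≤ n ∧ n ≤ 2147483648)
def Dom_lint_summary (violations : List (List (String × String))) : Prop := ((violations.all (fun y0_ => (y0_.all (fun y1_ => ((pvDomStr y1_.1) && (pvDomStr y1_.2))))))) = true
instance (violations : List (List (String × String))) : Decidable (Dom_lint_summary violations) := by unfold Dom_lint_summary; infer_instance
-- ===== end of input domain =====

-- B replaces A's dict-of-lists grouping, lines list and str.join with a sorted distinct-rule
-- set, per-rule filter passes, case analysis on the detail count instead of slicing, and a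
-- single string accumulator (alternative decomposition, similar cost); equality proved on all
-- inputs whose dicts carry the "rule" and "detail" keys (elsewhere both Pythons raise KeyError).

-- shared primitive: v[k] on a Python dict (Pre_ guarantees the key is present; KeyError excluded)
def pvGetItem (v : List (String × String)) (k : String) : String :=
  (PySem.Dict.mk v).getD k ""

-- ===== PORT A =====
def lint_summary (violations : List (List (String × String))) : String :=
  if violations = [] then "통과 (R1~R8 위반 없음)"
  else
    -- grouped.setdefault(v["rule"], []).append(v["detail"])
    let grouped : PySem.Dict String (List String) :=
      violations.foldl
        (fun d v => d.modify (pvGetItem v "rule") [] (fun ds => ds ++ [pvGetItem v "detail"]))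
        PySem.Dict.empty
    -- for rule, details in sorted(grouped.items()):  (Python tuple comparison)
    let lines : List String :=
      (PySem.List.sorted2 grouped.items (fun p => p.1) (fun p => p.2)).foldl
        (fun acc p =>
          -- lines.append(f"  {rule}: ...") then lines[-1] += suffix when len > 2
          let line := "  " ++ p.1 ++ ": " ++ PySem.Str.join ", " (PySem.List.slice p.2 none (some 2))
          let line := if p.2.length > 2 then
              line ++ " (외 " ++ PySem.Int.toStr ((p.2.length : Int) - 2) ++ "건)"
            else line
          acc ++ [line]) []
    PySem.Str.join "\n" lines

-- ===== PORT B =====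
-- body of one summary line: explicit case analysis on the number of details (Source B's
-- if len==1 / len==2 / else chain; the [] case is unreachable — every rule comes from the set)
def pvBody (details : List String) : String :=
  match details with
  | [] => ""
  | [d0] => d0
  | d0 :: d1 :: rest =>
      if rest = [] then d0 ++ ", " ++ d1
      else d0 ++ ", " ++ d1 ++ " (외 " ++ PySem.Int.toStr ((details.length : Int) - 2) ++ "건)"

def lint_summary_alt (violations : List (List (String × String))) : String :=
  if violations = [] then "통과 (R1~R8 위반 없음)"
  else
    -- out/sep string accumulator over the sorted distinct rules
    (PySem.List.sorted (PySem.Set.ofList (violations.map (fun v => pvGetItem v "rule")))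
        (fun r => r)).foldl
      (fun (st : String × String) rule =>
        let details := (violations.filter (fun v => pvGetItem v "rule" == rule)).map
          (fun v => pvGetItem v "detail")
        (st.1 ++ (st.2 ++ "  " ++ rule ++ ": " ++ pvBody details), "\n"))
      ("", "") |>.1

-- ===== PRECONDITION & SPEC =====
-- Pre_ excludes exactly the inputs where some violation dict lacks the "rule" or "detail"
-- key: there the Python A raises KeyError (and B does too).
def Pre_lint_summary (violations : List (List (String × String))) : Prop :=
  (violations.all (fun v => (PySem.Dict.mk v).contains "rule" && (PySem.Dict.mk v).contains "detail")) = true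
instance (violations : List (List (String × String))) : Decidable (Pre_lint_summary violations) := by
  unfold Pre_lint_summary; infer_instance

def pvWitness_lint_summary : (List (List (String × String))) :=
  [[("rule", "R1"), ("detail", "a")], [("rule", "R1"), ("detail", "b")], [("rule", "R2"), ("detail", "c")]]

def Spec_lint_summary (violations : List (List (String × String))) (out : String) : Prop := out = lint_summary_alt violations
instance (violations : List (List (String × String))) (out : String) : Decidable (Spec_lint_summary violations out) := by unfold Spec_lint_summary; infer_instance

-- ===== CLAIM (what is proved, stated in full; the proofs are below) =====
def Claim_equal_lint_summary : Prop := ∀ (violations : List (List (String × String))), Dom_lint_summary violations → Pre_lint_summary violations → Spec_lint_summary violations (lint_summary violations)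

-- ===== LEMMAS AND PROOFS =====

theorem pv_insertBy_congr {α : Type} (f g : α → α → Bool) (x : α) (ys : List α)
    (h : ∀ b ∈ ys, f x b = g x b) :
    PySem.List.insertBy f x ys = PySem.List.insertBy g x ys := by
  induction ys with
  | nil => rfl
  | cons y ys ih =>
    simp only [PySem.List.insertBy]
    rw [h y (List.mem_cons_self)]
    by_cases hg : g x y = true
    · simp [hg]
    · simp only [hg]
      rw [ih (fun b hb => h b (List.mem_cons_of_mem _ hb))]

theorem pv_foldl_insertBy_congr {α : Type} (f g : α → α → Bool) (xs acc : List α)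
    (S : List α) (hxs : ∀ a ∈ xs, a ∈ S) (hacc : ∀ a ∈ acc, a ∈ S)
    (h : ∀ a ∈ S, ∀ b ∈ S, f a b = g a b) :
    xs.foldl (fun acc x => PySem.List.insertBy f x acc) acc
      = xs.foldl (fun acc x => PySem.List.insertBy g x acc) acc := by
  induction xs generalizing acc with
  | nil => rfl
  | cons x xs ih =>
    simp only [List.foldl_cons]
    have hx : x ∈ S := hxs x List.mem_cons_self
    rw [pv_insertBy_congr f g x acc (fun b hb => h x hx b (hacc b hb))]
    exact ih (PySem.List.insertBy g x acc) (fun a ha => hxs a (List.mem_cons_of_mem _ ha))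
      (fun a ha => by
        rcases (PySem.List.mem_insertBy g x a acc).1 ha with rfl | ha'
        · exact hx
        · exact hacc a ha')

theorem pv_sorted2_eq_sorted (items : List (String × List String))
    (hinj : ∀ a ∈ items, ∀ b ∈ items, a.1 = b.1 → a = b) :
    PySem.List.sorted2 items (fun p => p.1) (fun p => p.2)
      = PySem.List.sorted items (fun p => p.1) := by
  rw [PySem.List.sorted_eq_foldl_insertBy]
  show items.foldl (fun acc x => PySem.List.insertBy _ x acc) [] = _
  apply pv_foldl_insertBy_congr _ _ items [] items (fun a ha => ha) (by simp)
  intro a ha b hb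
  rcases lt_trichotomy a.1 b.1 with hlt | heq | hgt
  · simp [hlt]
  · have : a = b := hinj a ha b hb heq
    subst this
    simp
  · simp [hgt, not_lt.2 (le_of_lt hgt)]

-- sep.join over a two-or-more-element list, as one append step
theorem pv_join_cons2 (sep a b : String) (t : List String) :
    PySem.Str.join sep (a :: b :: t) = a ++ sep ++ PySem.Str.join sep (b :: t) := by
  apply String.toList_inj.mp
  simp [PySem.Str.join, PySem.Chars.join_cons_cons]

-- A's formatted line for (rule, details) is B's "  rule: " ++ pvBody details
theorem pv_line_eq (r : String) (ds : List String) :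
    (let line := "  " ++ r ++ ": " ++ PySem.Str.join ", " (PySem.List.slice ds none (some 2))
     if ds.length > 2 then
       line ++ " (외 " ++ PySem.Int.toStr ((ds.length : Int) - 2) ++ "건)"
     else line)
      = "  " ++ r ++ ": " ++ pvBody ds := by
  rw [PySem.List.slice_to ds (by omega)]
  match ds with
  | [] => simp [pvBody, PySem.Str.join]
  | [d0] => simp [pvBody, PySem.Str.join]
  | [d0, d1] =>
      apply String.toList_inj.mp
      simp [pvBody, PySem.Str.join, PySem.Chars.join_cons_cons]
  | d0 :: d1 :: d2 :: t =>
      apply String.toList_inj.mp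
      have h2 : (d0 :: d1 :: d2 :: t).length > 2 := by simp
      rw [if_pos h2]
      simp [pvBody, PySem.Str.join, PySem.Chars.join_cons_cons, List.take]

-- appended-singleton folds with pointwise-equal element functions agree
theorem pv_foldl_snoc_congr {β : Type} {e₁ e₂ : β → String} (l : List β) (acc : List String)
    (h : ∀ x, e₁ x = e₂ x) :
    l.foldl (fun a x => a ++ [e₁ x]) acc = l.foldl (fun a x => a ++ [e₂ x]) acc := by
  induction l generalizing acc with
  | nil => rfl
  | cons x t ih => simp only [List.foldl_cons, h x, ih]

-- B's out/sep accumulator, once the separator is "\n", computes acc ++ "\n".join of the lines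
theorem pv_foldl_sep (e : String → String) (l : List String) (acc : String) :
    (l.foldl (fun (st : String × String) r =>
        (st.1 ++ (st.2 ++ "  " ++ r ++ ": " ++ e r), "\n")) (acc, "\n")).1
      = if l = [] then acc
        else acc ++ "\n" ++ PySem.Str.join "\n" (l.map (fun r => "  " ++ r ++ ": " ++ e r)) := by
  induction l generalizing acc with
  | nil => rfl
  | cons x t ih =>
    simp only [List.foldl_cons, ih]
    match t with
    | [] =>
      apply String.toList_inj.mp
      simp [PySem.Str.join]
    | y :: t' =>
      simp only [List.map_cons, if_neg (by simp : ¬(y :: t' = [])), if_neg (by simp : ¬(x :: y :: t' = []))]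
      rw [pv_join_cons2]
      apply String.toList_inj.mp
      simp

theorem pv_main (violations : List (List (String × String))) :
    lint_summary violations = lint_summary_alt violations := by
  unfold lint_summary lint_summary_alt
  by_cases hv : violations = []
  · simp [hv]
  · simp only [if_neg hv]
    set ruleOf : List (String × String) → String := fun v => pvGetItem v "rule" with hruleOf
    set detOf : List (String × String) → String := fun v => pvGetItem v "detail" with hdetOf
    set dets : String → List String :=
      fun r => (violations.filter (fun v => ruleOf v == r)).map detOf with hdets
    set R : List String := violations.map ruleOf with hR
    set grouped : PySem.Dict String (List String) :=
      violations.foldl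
        (fun d v => d.modify (ruleOf v) [] (fun ds => ds ++ [detOf v])) PySem.Dict.empty
      with hgrouped
    have hkeys : grouped.keys = PySem.Set.ofList R := by
      rw [hgrouped, PySem.Dict.keys_foldl_modify_key violations ruleOf []
        (fun _ v ds => ds ++ [detOf v]) PySem.Dict.empty]
      rfl
    have hnodup : grouped.keys.Nodup := by
      rw [hgrouped]
      exact PySem.Dict.nodup_keys_foldl_modify_key violations ruleOf []
        (fun _ v ds => ds ++ [detOf v]) PySem.Dict.empty (by simp [PySem.Dict.empty, PySem.Dict.keys])
    have hgetD : ∀ r, grouped.getD r [] = dets r := by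
      intro r
      have hfold : grouped = (violations.map (fun v => (ruleOf v, detOf v))).foldl
          (fun d p => d.modify p.1 [] (fun ds => ds ++ [p.2])) PySem.Dict.empty := by
        rw [List.foldl_map]
      rw [hfold, PySem.Dict.getD_foldl_modify_append]
      simp only [hdets, List.filter_map, List.map_map]
      rfl
    have hitems : grouped.items = (PySem.Set.ofList R).map (fun r => (r, dets r)) := by
      rw [PySem.Dict.items_eq_map_keys grouped hnodup [], hkeys]
      simp only [hgetD]
    have hinj : ∀ a ∈ grouped.items, ∀ b ∈ grouped.items, a.1 = b.1 → a = b := by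
      intro a ha b hb hab
      have := List.inj_on_of_nodup_map (f := Prod.fst) (l := grouped.items)
      exact this hnodup ha hb hab
    rw [pv_sorted2_eq_sorted grouped.items hinj]
    have hsorted : PySem.List.sorted grouped.items (fun p => p.1)
        = (PySem.List.sorted (PySem.Set.ofList R) (fun r => r)).map (fun r => (r, dets r)) := by
      apply PySem.List.sorted_eq_of_perm_of_pairwise_lt
      · rw [hitems]
        exact (PySem.List.sorted_perm (PySem.Set.ofList R) (fun r => r) false).map _
      · have := PySem.List.sorted_ofList_pairwise_lt (κ := String) R
        exact List.pairwise_map.2 (this.imp (fun h => h))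
    rw [hsorted, List.foldl_map]
    set rules : List String := PySem.List.sorted (PySem.Set.ofList R) (fun r => r) with hrules
    have hne : rules ≠ [] := by
      intro h0
      have hperm := PySem.List.sorted_perm (PySem.Set.ofList R) (fun r => r) false
      rw [← hrules, h0] at hperm
      have hnil : PySem.Set.ofList R = [] := hperm.symm.eq_nil
      obtain ⟨x, hx⟩ := List.exists_mem_of_ne_nil R (by simp [hR, hv])
      have hmem : x ∈ PySem.Set.ofList R := (PySem.Set.mem_ofList R x).mpr hx
      rw [hnil] at hmem
      simp at hmem
    -- both sides now run over the same sorted rule list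
    have hA : ∀ acc : List String, (rules.foldl (fun acc r =>
          acc ++ [(let line := "  " ++ (r, dets r).1 ++ ": "
                ++ PySem.Str.join ", " (PySem.List.slice (r, dets r).2 none (some 2))
            if (r, dets r).2.length > 2 then
              line ++ " (외 " ++ PySem.Int.toStr (((r, dets r).2.length : Int) - 2) ++ "건)"
            else line)]) acc)
        = rules.foldl (fun acc r => acc ++ ["  " ++ r ++ ": " ++ pvBody (dets r)]) acc := by
      intro acc
      exact pv_foldl_snoc_congr rules acc (fun x => pv_line_eq x (dets x))
    rw [hA, PySem.List.foldl_append_singleton_eq_map]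
    match rules, hne with
    | x :: t, _ =>
      simp only [List.foldl_cons]
      rw [pv_foldl_sep (fun r => pvBody (dets r)) t]
      match t with
      | [] =>
        apply String.toList_inj.mp
        simp [PySem.Str.join, hdets, hruleOf, hdetOf]
      | y :: t' =>
        simp only [List.map_cons, if_neg (by simp : ¬(y :: t' = [])), List.nil_append]
        rw [pv_join_cons2]
        apply String.toList_inj.mp
        simp [hdets, hruleOf, hdetOf]

-- ===== VERDICT (by name: the statement is the Claim_ definition above) =====
theorem lint_summary_spec : Claim_equal_lint_summary := by
  intro violations _ _
  unfold Spec_lint_summary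
  exact pv_main violations
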